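-- pv_equiv track=rewrite | github.com/ywj0212/yonhwa-magazine-sans | build.py | pick_cid_indices_by_patterns
-- ===== SOURCE A (Python) =====
-- def pick_cid_indices_by_patterns(name_index, patterns):
--     """Pick subfont indices whose names contain any pattern."""
--     out = []
--     for pat in patterns:
--         for name, i in name_index.items():
--             if pat in name:
--                 out.append(i)
--     seen = set()
--     uniq = []
--     for i in out:
--         if i in seen:
--             continue
--         seen.add(i)
--         uniq.append(i)
--     return uniq
-- ===== SOURCE B (Python) =====
-- def pick_cid_indices_by_patterns(name_index, patterns):
--     """Pick subfont indices whose names contain any pattern."""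
--     # One pass over the names: each name is scanned only until its FIRST
--     # matching pattern and bucketed under that pattern's index; the buckets
--     # are then emitted in pattern order with an order-preserving dedup.
--     buckets = [[] for _ in patterns]
--     for name, i in name_index.items():
--         for p, pat in enumerate(patterns):
--             if pat in name:
--                 buckets[p].append(i)
--                 break
--     seen = set()
--     uniq = []
--     for bucket in buckets:
--         for i in bucket:
--             if i not in seen:
--                 seen.add(i)
--                 uniq.append(i)
--     return uniq
-- ===== Notes on version B (the rewrite author's own statement) =====
-- stated objective: faster
-- what changed: A rescans every name once per pattern and then deduplicates the collected list; B makes one pass over the names, bucketing each index under the first matching pattern (breaking out of the pattern scan on the first hit), then emits the buckets in pattern order with the same order-preserving dedup.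
import Mathlib
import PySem

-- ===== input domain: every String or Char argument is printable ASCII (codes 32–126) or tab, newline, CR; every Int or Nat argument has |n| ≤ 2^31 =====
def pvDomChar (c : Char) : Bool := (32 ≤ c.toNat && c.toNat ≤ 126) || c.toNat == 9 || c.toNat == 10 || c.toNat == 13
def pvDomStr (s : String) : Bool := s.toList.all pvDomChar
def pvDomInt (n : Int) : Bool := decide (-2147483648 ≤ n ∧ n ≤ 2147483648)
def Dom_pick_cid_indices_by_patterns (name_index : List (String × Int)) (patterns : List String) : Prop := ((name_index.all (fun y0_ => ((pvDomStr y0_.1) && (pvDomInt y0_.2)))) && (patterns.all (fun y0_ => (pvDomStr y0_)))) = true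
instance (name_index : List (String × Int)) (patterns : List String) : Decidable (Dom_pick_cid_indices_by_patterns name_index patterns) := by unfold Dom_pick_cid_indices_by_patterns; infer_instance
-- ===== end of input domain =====

-- B buckets each name under its FIRST matching pattern in one scan (with break), then emits
-- buckets in pattern order with the dedup; A rescans all names for every pattern.


-- the identical dedup loop body both Pythons end with ('if i in seen: continue; seen.add(i); uniq.append(i)')
def pvDedupStep (st : PySem.Set Int × List Int) (i : Int) : PySem.Set Int × List Int :=
  if st.1.contains i then st else (st.1.add i, st.2 ++ [i])

-- ===== PORT A =====
def pick_cid_indices_by_patterns (name_index : List (String × Int)) (patterns : List String) : List Int :=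
  -- 'out' is the doubly-nested append loop; the trailing fold is the seen/uniq dedup loop
  ((patterns.foldl (fun out pat =>
      (PySem.Dict.ofList name_index).items.foldl (fun out ni =>
        if PySem.Str.isIn pat ni.1 then out ++ [ni.2] else out) out) []).foldl
    pvDedupStep (PySem.Set.empty, [])).2

-- ===== PORT B =====
def pick_cid_indices_by_patterns_alt (name_index : List (String × Int)) (patterns : List String) : List Int :=
  -- first fold builds 'buckets' (findIdx? = the inner for/if with break); second is the dedup loop
  (((PySem.Dict.ofList name_index).items.foldl (fun b ni =>
      match patterns.findIdx? (fun pat => PySem.Str.isIn pat ni.1) with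
      | some p => b.set p (b.getD p [] ++ [ni.2])
      | none => b) (List.replicate patterns.length [])).foldl
    (fun st bucket => bucket.foldl pvDedupStep st) (PySem.Set.empty, [])).2

-- ===== PRECONDITION & SPEC =====
def Spec_pick_cid_indices_by_patterns (name_index : List (String × Int)) (patterns : List String) (out : List Int) : Prop := out = pick_cid_indices_by_patterns_alt name_index patterns
instance (name_index : List (String × Int)) (patterns : List String) (out : List Int) : Decidable (Spec_pick_cid_indices_by_patterns name_index patterns out) := by unfold Spec_pick_cid_indices_by_patterns; infer_instance

-- ===== CLAIM (what is proved, stated in full; the proofs are below) =====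
def Claim_equal_pick_cid_indices_by_patterns : Prop := ∀ (name_index : List (String × Int)) (patterns : List String), Dom_pick_cid_indices_by_patterns name_index patterns → Spec_pick_cid_indices_by_patterns name_index patterns (pick_cid_indices_by_patterns name_index patterns)

-- ===== LEMMAS AND PROOFS =====

-- the dedup scan: emitted elements, given the set of already-seen values
def pvDD : PySem.Set Int → List Int → List Int
  | _, [] => []
  | s, i :: t => if s.contains i then pvDD s t else i :: pvDD (s.add i) t

lemma pvAdd_of_contains (s : PySem.Set Int) (i : Int) (h : s.contains i = true) :
    s.add i = s := by
  simp [PySem.Set.add, (PySem.Set.contains_iff s i).mp h]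

lemma pvDD_foldl (l : List Int) : ∀ (s : PySem.Set Int) (acc : List Int),
    l.foldl pvDedupStep (s, acc) = (s.update l, acc ++ pvDD s l) := by
  induction l with
  | nil => intro s acc; simp [pvDD, PySem.Set.update]
  | cons i t ih =>
    intro s acc
    by_cases h : s.contains i = true
    · simp only [List.foldl_cons, pvDedupStep, h, if_true, pvDD, ih]
      simp [PySem.Set.update, pvAdd_of_contains s i h]
    · simp only [List.foldl_cons, pvDedupStep, h, pvDD, ih,
        Bool.not_eq_true] at *
      simp [PySem.Set.update, List.append_assoc]

lemma pvContains_congr (s s' : PySem.Set Int) (h : ∀ x, x ∈ s ↔ x ∈ s') (i : Int) :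
    s.contains i = s'.contains i := by
  by_cases hi : i ∈ s
  · rw [(PySem.Set.contains_iff s i).mpr hi, ((PySem.Set.contains_iff s' i).mpr ((h i).mp hi)).symm]
  · have hi' : i ∉ s' := fun hc => hi ((h i).mpr hc)
    have e1 : s.contains i = false := by
      rw [Bool.eq_false_iff]; exact fun hc => hi ((PySem.Set.contains_iff s i).mp hc)
    have e2 : s'.contains i = false := by
      rw [Bool.eq_false_iff]; exact fun hc => hi' ((PySem.Set.contains_iff s' i).mp hc)
    rw [e1, e2]

lemma pvDD_congr (l : List Int) : ∀ (s s' : PySem.Set Int),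
    (∀ x, x ∈ s ↔ x ∈ s') → pvDD s l = pvDD s' l := by
  induction l with
  | nil => intro s s' _; rfl
  | cons i t ih =>
    intro s s' h
    simp only [pvDD, pvContains_congr s s' h i]
    by_cases hc : s'.contains i = true
    · simp only [hc, if_true]; exact ih s s' h
    · have hc' : s'.contains i = false := by rwa [Bool.not_eq_true] at hc
      have hadd : ∀ x, x ∈ s.add i ↔ x ∈ s'.add i := by
        intro x; rw [PySem.Set.mem_add, PySem.Set.mem_add, h x]
      simp only [hc', Bool.false_eq_true, if_false]
      rw [ih _ _ hadd]

lemma pvDD_append (l1 : List Int) : ∀ (l2 : List Int) (s : PySem.Set Int),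
    pvDD s (l1 ++ l2) = pvDD s l1 ++ pvDD (s.update l1) l2 := by
  induction l1 with
  | nil => intro l2 s; simp [pvDD, PySem.Set.update]
  | cons i t ih =>
    intro l2 s
    by_cases h : s.contains i = true
    · simp only [List.cons_append, pvDD, h, if_true, ih]
      simp [PySem.Set.update, pvAdd_of_contains s i h]
    · simp only [List.cons_append, pvDD, h, ih]
      simp [PySem.Set.update]

-- 'ni's name matched some pattern strictly before index p'
def pvEarlier (patterns : List String) (ni : String × Int) (p : Nat) : Prop :=
  ∃ q, q < p ∧ ∃ hq : q < patterns.length, PySem.Str.isIn patterns[q] ni.1 = true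

-- the first matching pattern of a name that matches pattern p has index ≤ p
lemma pvFindIdx_le (patterns : List String) (ni : String × Int) (p : Nat)
    (hp : p < patterns.length) (hm : PySem.Str.isIn patterns[p] ni.1 = true) :
    ∃ q, patterns.findIdx? (fun pat => PySem.Str.isIn pat ni.1) = some q ∧ q ≤ p ∧
      ∃ hq : q < patterns.length, PySem.Str.isIn patterns[q] ni.1 = true := by
  cases hf : patterns.findIdx? (fun pat => PySem.Str.isIn pat ni.1) with
  | none =>
    rw [List.findIdx?_eq_none_iff] at hf
    have hfalse := hf patterns[p] (List.getElem_mem hp)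
    rw [hm] at hfalse
    exact absurd hfalse (by simp)
  | some q =>
    obtain ⟨hq, hpred, hmin⟩ := List.findIdx?_eq_some_iff_getElem.mp hf
    refine ⟨q, rfl, ?_, hq, hpred⟩
    by_contra hgt
    exact (hmin p (by omega)) hm

-- scanning pattern p's full match row deduplicates to the same output as its bucket,
-- provided every name matched earlier is already seen
lemma pvRowBucket (patterns : List String) (p : Nat) (hp : p < patterns.length) :
    ∀ (ns : List (String × Int)) (s : PySem.Set Int),
    (∀ ni ∈ ns, pvEarlier patterns ni p → ni.2 ∈ s) →
    pvDD s ((ns.filter (fun ni => PySem.Str.isIn patterns[p] ni.1)).map Prod.snd)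
      = pvDD s ((ns.filter (fun ni =>
          patterns.findIdx? (fun pat => PySem.Str.isIn pat ni.1) == some p)).map Prod.snd) := by
  intro ns
  induction ns with
  | nil => intro s _; rfl
  | cons ni t ih =>
    intro s hyp
    have hypt : ∀ x ∈ t, pvEarlier patterns x p → x.2 ∈ s :=
      fun x hx => hyp x (List.mem_cons_of_mem ni hx)
    by_cases hrow : PySem.Str.isIn patterns[p] ni.1 = true
    · obtain ⟨q, hfi, hqle, hq, hqm⟩ := pvFindIdx_le patterns ni p hp hrow
      rcases Nat.lt_or_ge q p with hqlt | hqge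
      · -- first match is earlier: ni.2 ∈ s, row keeps ni but the scan skips it
        have hmem : ni.2 ∈ s := hyp ni (List.mem_cons_self) ⟨q, hqlt, hq, hqm⟩
        have hcont : s.contains ni.2 = true := (PySem.Set.contains_iff s ni.2).mpr hmem
        have hne : (patterns.findIdx? (fun pat => PySem.Str.isIn pat ni.1) == some p) = false := by
          rw [hfi]; simp; omega
        simp only [List.filter_cons, hrow, if_true, hne,
          List.map_cons, pvDD, hcont, Bool.false_eq_true, if_false]
        exact ih s hypt
      · -- first match IS p: both sides keep ni
        have hqp : q = p := by omega
        have heq : (patterns.findIdx? (fun pat => PySem.Str.isIn pat ni.1) == some p) = true := by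
          rw [hfi, hqp]; simp
        simp only [List.filter_cons, hrow, if_true, heq, List.map_cons, pvDD]
        by_cases hc : s.contains ni.2 = true
        · simp only [hc, if_true]; exact ih s hypt
        · have hc' : s.contains ni.2 = false := by rwa [Bool.not_eq_true] at hc
          simp only [hc', Bool.false_eq_true, if_false]
          have hstep : ∀ x ∈ t, pvEarlier patterns x p → x.2 ∈ s.add ni.2 :=
            fun x hx he => (PySem.Set.mem_add s ni.2 x.2).mpr (Or.inl (hypt x hx he))
          rw [ih (s.add ni.2) hstep]
    · -- no match at p: both filters drop ni
      have hrow' : (PySem.Str.isIn patterns[p] ni.1) = false := by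
        simpa [Bool.not_eq_true] using hrow
      have hne : (patterns.findIdx? (fun pat => PySem.Str.isIn pat ni.1) == some p) = false := by
        cases hf : patterns.findIdx? (fun pat => PySem.Str.isIn pat ni.1) with
        | none => simp
        | some q =>
          obtain ⟨hq, hpred, _⟩ := List.findIdx?_eq_some_iff_getElem.mp hf
          rw [Bool.eq_false_iff]
          intro hc
          have hqp : q = p := by simpa using hc
          subst hqp
          rw [hrow'] at hpred
          exact absurd hpred (by simp)
      simp only [List.filter_cons, hrow', hne, Bool.false_eq_true, if_false]
      exact ih s hypt

-- after processing pattern p, 'seen ∪ row p' and 'seen ∪ bucket p' contain the same values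
lemma pvUpdateEquiv (patterns : List String) (p : Nat) (hp : p < patterns.length)
    (ns : List (String × Int)) (s : PySem.Set Int)
    (hyp : ∀ ni ∈ ns, pvEarlier patterns ni p → ni.2 ∈ s) :
    ∀ x, x ∈ s.update ((ns.filter (fun ni => PySem.Str.isIn patterns[p] ni.1)).map Prod.snd)
      ↔ x ∈ s.update ((ns.filter (fun ni =>
          patterns.findIdx? (fun pat => PySem.Str.isIn pat ni.1) == some p)).map Prod.snd) := by
  intro x
  rw [PySem.Set.mem_update, PySem.Set.mem_update]
  constructor
  · rintro (hx | hx)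
    · exact Or.inl hx
    · simp only [List.mem_map, List.mem_filter] at hx
      obtain ⟨ni, ⟨hmem, hmatch⟩, hval⟩ := hx
      obtain ⟨q, hfi, hqle, hq, hqm⟩ := pvFindIdx_le patterns ni p hp hmatch
      rcases Nat.lt_or_ge q p with hqlt | hqge
      · exact Or.inl (hval ▸ hyp ni hmem ⟨q, hqlt, hq, hqm⟩)
      · have hqp : q = p := by omega
        refine Or.inr ?_
        simp only [List.mem_map, List.mem_filter]
        exact ⟨ni, ⟨hmem, by rw [hfi, hqp]; simp⟩, hval⟩
  · rintro (hx | hx)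
    · exact Or.inl hx
    · simp only [List.mem_map, List.mem_filter] at hx
      obtain ⟨ni, ⟨hmem, hmatch⟩, hval⟩ := hx
      have hfi : patterns.findIdx? (fun pat => PySem.Str.isIn pat ni.1) = some p := by
        simpa using hmatch
      obtain ⟨hq, hpred, _⟩ := List.findIdx?_eq_some_iff_getElem.mp hfi
      refine Or.inr ?_
      simp only [List.mem_map, List.mem_filter]
      exact ⟨ni, ⟨hmem, hpred⟩, hval⟩

-- main invariant: from pattern p on, dedup-scanning the match rows equals
-- dedup-scanning the first-match buckets
lemma pvMain (patterns : List String) (names : List (String × Int)) :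
    ∀ (k p : Nat) (s : PySem.Set Int), patterns.length = p + k →
    (∀ ni ∈ names, pvEarlier patterns ni p → ni.2 ∈ s) →
    pvDD s ((patterns.drop p).flatMap
        (fun pat => (names.filter (fun ni => PySem.Str.isIn pat ni.1)).map Prod.snd))
      = pvDD s ((List.range' p k).flatMap
        (fun q => (names.filter (fun ni =>
            patterns.findIdx? (fun pat => PySem.Str.isIn pat ni.1) == some q)).map Prod.snd)) := by
  intro k
  induction k with
  | zero =>
    intro p s hlen _
    have : p = patterns.length := by omega
    subst this
    simp [List.drop_length]
  | succ k ih =>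
    intro p s hlen hyp
    have hp : p < patterns.length := by omega
    rw [List.drop_eq_getElem_cons hp, List.range'_succ, List.flatMap_cons, List.flatMap_cons,
      pvDD_append, pvDD_append]
    have hrow := pvRowBucket patterns p hp names s hyp
    rw [hrow]
    congr 1
    have hyp' : ∀ ni ∈ names, pvEarlier patterns ni (p + 1) →
        ni.2 ∈ s.update ((names.filter (fun ni => PySem.Str.isIn patterns[p] ni.1)).map Prod.snd) := by
      intro ni hmem ⟨q, hqlt, hq, hqm⟩
      rw [PySem.Set.mem_update]
      rcases Nat.lt_or_ge q p with h | h
      · exact Or.inl (hyp ni hmem ⟨q, h, hq, hqm⟩)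
      · have : q = p := by omega
        subst this
        refine Or.inr ?_
        simp only [List.mem_map, List.mem_filter]
        exact ⟨ni, ⟨hmem, hqm⟩, rfl⟩
    rw [ih (p + 1) _ (by omega) hyp']
    exact pvDD_congr _ _ _ (pvUpdateEquiv patterns p hp names s hyp)

-- B's bucket-building fold, characterised per index
lemma pvBuild (patterns : List String) :
    ∀ (ns : List (String × Int)) (b : List (List Int)), b.length = patterns.length →
    (ns.foldl (fun b ni =>
        match patterns.findIdx? (fun pat => PySem.Str.isIn pat ni.1) with
        | some p => b.set p (b.getD p [] ++ [ni.2])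
        | none => b) b).length = patterns.length ∧
    ∀ p, p < patterns.length →
      (ns.foldl (fun b ni =>
        match patterns.findIdx? (fun pat => PySem.Str.isIn pat ni.1) with
        | some p => b.set p (b.getD p [] ++ [ni.2])
        | none => b) b).getD p []
      = b.getD p [] ++ ((ns.filter (fun ni =>
          patterns.findIdx? (fun pat => PySem.Str.isIn pat ni.1) == some p)).map Prod.snd) := by
  intro ns
  induction ns with
  | nil => intro b hb; exact ⟨hb, fun p _ => by simp⟩
  | cons ni t ih =>
    intro b hb
    simp only [List.foldl_cons]
    cases hf : patterns.findIdx? (fun pat => PySem.Str.isIn pat ni.1) with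
    | none =>
      obtain ⟨hlen, hch⟩ := ih b hb
      refine ⟨hlen, fun p hp => ?_⟩
      rw [hch p hp]
      have hcond : (patterns.findIdx? (fun pat => PySem.Str.isIn pat ni.1) == some p) = false := by
        rw [hf]; rfl
      simp only [List.filter_cons, hcond, Bool.false_eq_true, if_false]
    | some q =>
      have hqlen : q < patterns.length := by
        obtain ⟨hq, _, _⟩ := List.findIdx?_eq_some_iff_getElem.mp hf
        exact hq
      have hb' : (b.set q (b.getD q [] ++ [ni.2])).length = patterns.length := by
        rw [List.length_set]; exact hb
      obtain ⟨hlen, hch⟩ := ih (b.set q (b.getD q [] ++ [ni.2])) hb'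
      refine ⟨hlen, fun p hp => ?_⟩
      rw [hch p hp, List.filter_cons]
      by_cases hpq : q = p
      · subst hpq
        have : (b.set q (b.getD q [] ++ [ni.2])).getD q [] = b.getD q [] ++ [ni.2] := by
          rw [List.getD_eq_getElem?_getD, List.getElem?_set]
          simp [hb ▸ hqlen]
        rw [this]
        have hcond : (patterns.findIdx? (fun pat => PySem.Str.isIn pat ni.1) == some q) = true := by
          rw [hf]; exact beq_self_eq_true _
        simp only [hcond, if_true, List.map_cons, List.append_assoc,
          List.singleton_append]
      · have : (b.set q (b.getD q [] ++ [ni.2])).getD p [] = b.getD p [] := by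
          rw [List.getD_eq_getElem?_getD, List.getElem?_set]
          simp [hpq, List.getD_eq_getElem?_getD]
        rw [this]
        have hcond : (patterns.findIdx? (fun pat => PySem.Str.isIn pat ni.1) == some p) = false := by
          rw [hf, Bool.eq_false_iff]
          intro hc
          exact hpq (by simpa using hc)
        simp only [hcond, Bool.false_eq_true, if_false]

-- ===== VERDICT (by name: the statement is the Claim_ definition above) =====
theorem pick_cid_indices_by_patterns_spec : Claim_equal_pick_cid_indices_by_patterns := by
  intro name_index patterns _
  unfold Spec_pick_cid_indices_by_patterns
  unfold pick_cid_indices_by_patterns pick_cid_indices_by_patterns_alt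
  generalize (PySem.Dict.ofList name_index).items = names
  -- normalise port A to pvDD over the concatenated match rows
  have hA : (patterns.foldl (fun out pat =>
      names.foldl (fun out ni =>
        if PySem.Str.isIn pat ni.1 then out ++ [ni.2] else out) out) []) =
      patterns.flatMap (fun pat =>
        (names.filter (fun ni => PySem.Str.isIn pat ni.1)).map Prod.snd) := by
    have hinner : ∀ (pat : String) (acc : List Int),
        names.foldl (fun out ni =>
          if PySem.Str.isIn pat ni.1 then out ++ [ni.2] else out) acc
        = acc ++ (names.filter (fun ni => PySem.Str.isIn pat ni.1)).map Prod.snd := by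
      intro pat acc
      exact PySem.List.foldl_append_if (fun (ni : String × Int) => PySem.Str.isIn pat ni.1)
        (fun ni => ni.2) names acc
    rw [PySem.List.foldl_congr_mem patterns _ _ [] (fun acc pat _ => hinner pat acc),
      PySem.List.foldl_append_eq_flatMap]
    simp
  rw [hA]
  -- normalise port B's buckets to the per-index bucket lists
  obtain ⟨hlen, hch⟩ := pvBuild patterns names (List.replicate patterns.length []) (by simp)
  have hbuckets : (names.foldl (fun b ni =>
      match patterns.findIdx? (fun pat => PySem.Str.isIn pat ni.1) with
      | some p => b.set p (b.getD p [] ++ [ni.2])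
      | none => b) (List.replicate patterns.length []))
      = (List.range' 0 patterns.length).map (fun q =>
          (names.filter (fun ni =>
            patterns.findIdx? (fun pat => PySem.Str.isIn pat ni.1) == some q)).map Prod.snd) := by
    apply List.ext_getElem
    · rw [List.length_map, List.length_range']; exact hlen
    · intro i h1 h2
      have hi : i < patterns.length := hlen ▸ h1
      have hc := hch i hi
      rw [List.getD_eq_getElem?_getD, List.getElem?_eq_getElem h1] at hc
      rw [List.getElem_map, List.getElem_range']
      rw [List.getD_eq_getElem?_getD, List.getElem?_replicate] at hc
      simp only [hi, if_pos, Option.getD_some, List.nil_append] at hc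
      simpa using hc
  rw [hbuckets]
  -- both dedup loops are pvDD scans
  rw [← List.foldl_flatten, ← List.flatMap_def]
  rw [pvDD_foldl, pvDD_foldl]
  simp only [List.nil_append]
  have h0 : (∀ ni ∈ names, pvEarlier patterns ni 0 → ni.2 ∈ (PySem.Set.empty : PySem.Set Int)) := by
    rintro ni _ ⟨q, hq, _⟩
    omega
  have := pvMain patterns names patterns.length 0 PySem.Set.empty (by omega) h0
  simpa using this
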